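-- pv_equiv track=rewrite | github.com/dixilo/freq_selector | fs_data_gen.py | index_plan
-- ===== SOURCE A (Python) =====
-- def reverse(val):
--     ''' Reverse bits. Assuming the input has 14 bits
--     '''
--     return int(f'{val:014b}'[::-1], 2)
--
-- def index_plan(indices):
--     ''' Integrate a list of indices to a dictionary that contains
--         lists of "k"s (fft index) in bit-reversed order
--     '''
--     d_ret = {}
--     for _g in range(4):
--         d_ret[_g] = []
--
--     for _g, _i in indices:
--         d_ret[_g].append(_i)
--
--     for _g, _list in d_ret.items():
--         d_ret[_g] = [reverse(val) for val in sorted([reverse(ind) for ind in _list])]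
--
--     return d_ret
-- ===== SOURCE B (Python) =====
-- def reverse(val):
--     ''' Reverse bits. Assuming the input has 14 bits
--     '''
--     return int(f'{val:014b}'[::-1], 2)
--
-- def index_plan(indices):
--     ''' One global stable sort of the bit-reversed values, then a single
--         partition pass into the four group buckets (no per-group sorts).
--     '''
--     d_ret = {g: [] for g in range(4)}
--     for r, g in sorted(((reverse(i), g) for g, i in indices), key=lambda p: p[0]):
--         d_ret[g].append(reverse(r))
--     return d_ret
-- ===== Notes on version B (the rewrite author's own statement) =====
-- stated objective: alternative
-- what changed: A buckets the indices into the four groups first and then sorts each group's reversed values separately; B performs one global stable sort of all (reverse(i), g) pairs by the reversed value and then a single partition pass appends each item to its group, relying on stability so no per-group sort is needed.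
import Mathlib
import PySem

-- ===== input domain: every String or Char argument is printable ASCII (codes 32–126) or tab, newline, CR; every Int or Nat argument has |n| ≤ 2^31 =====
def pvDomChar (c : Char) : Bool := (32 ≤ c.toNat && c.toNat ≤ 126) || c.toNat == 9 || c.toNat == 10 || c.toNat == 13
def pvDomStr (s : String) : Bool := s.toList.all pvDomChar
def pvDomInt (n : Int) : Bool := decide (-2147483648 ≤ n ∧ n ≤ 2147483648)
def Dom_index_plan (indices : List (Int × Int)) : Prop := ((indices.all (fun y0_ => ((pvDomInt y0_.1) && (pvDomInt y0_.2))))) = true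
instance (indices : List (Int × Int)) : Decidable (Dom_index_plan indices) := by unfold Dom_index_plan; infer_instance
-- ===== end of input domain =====

-- B replaces A's bucket-then-4-per-group-sorts by ONE global stable sort of the
-- bit-reversed values followed by a single partition pass (objective: alternative decomposition).

-- ===== PORT A =====
-- reverse(val) = int(f'{val:014b}'[::-1], 2), ported by hand step for step:
-- binary digit string of val (MSB first), zero-padded on the left to 14 chars,
-- reversed, parsed in base 2. Exact for val ≥ 0 (Pre_ excludes negatives, where
-- Python raises ValueError on the '-' character).
def pyReverse (val : Int) : Int :=
  let s : List Char := Nat.toDigits 2 val.toNat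
  let s := (List.replicate (14 - s.length) '0') ++ s
  Int.ofNat (s.reverse.foldl (fun acc c => acc * 2 + (c.toNat - '0'.toNat)) 0)

def index_plan (indices : List (Int × Int)) : List (Int × List Int) :=
  -- d_ret = {}; for _g in range(4): d_ret[_g] = []
  let d0 : PySem.Dict Int (List Int) :=
    (PySem.List.pyRange 0 4 1).foldl (fun d g => d.insert g ([] : List Int)) PySem.Dict.empty
  -- for _g, _i in indices: d_ret[_g].append(_i)   (KeyError on _g ∉ {0..3}: outside Pre_)
  let d1 := indices.foldl (fun d p => d.modify p.1 [] (fun l => l ++ [p.2])) d0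
  -- for _g, _list in d_ret.items(): d_ret[_g] = [reverse(val) for val in sorted([reverse(ind) for ind in _list])]
  let d2 := d1.items.foldl
    (fun d p => d.insert p.1
      ((PySem.List.sorted (p.2.map pyReverse) (fun x => x)).map pyReverse)) d1
  d2.items

-- ===== PORT B =====
def index_plan_alt (indices : List (Int × Int)) : List (Int × List Int) :=
  -- d_ret = {g: [] for g in range(4)}
  let d0 : PySem.Dict Int (List Int) :=
    (PySem.List.pyRange 0 4 1).foldl (fun d g => d.insert g ([] : List Int)) PySem.Dict.empty
  -- sorted(((reverse(i), g) for g, i in indices), key=lambda p: p[0])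
  let pairs := PySem.List.sorted (indices.map (fun gi => (pyReverse gi.2, gi.1))) (fun p => p.1)
  -- for r, g in pairs: d_ret[g].append(reverse(r))
  let d := pairs.foldl (fun d p => d.modify p.2 [] (fun l => l ++ [pyReverse p.1])) d0
  d.items

-- ===== PRECONDITION & SPEC =====
-- Pre_ admits exactly the inputs on which Python A returns: every group must be one of
-- the pre-initialized keys 0,1,2,3 (else d_ret[_g].append raises KeyError) and every
-- index must be nonnegative (f'{val:014b}'[::-1] of a negative int puts the '-' sign at
-- the end, so int(…, 2) raises ValueError).
def Pre_index_plan (indices : List (Int × Int)) : Prop :=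
  ∀ p ∈ indices, p.1 ∈ ([0, 1, 2, 3] : List Int) ∧ 0 ≤ p.2
instance (indices : List (Int × Int)) : Decidable (Pre_index_plan indices) := by
  unfold Pre_index_plan; infer_instance

def pvWitness_index_plan : (List (Int × Int)) := [(0, 5), (2, 16385), (0, 3), (3, 0)]

def Spec_index_plan (indices : List (Int × Int)) (out : List (Int × List Int)) : Prop := out = index_plan_alt indices
instance (indices : List (Int × Int)) (out : List (Int × List Int)) : Decidable (Spec_index_plan indices out) := by unfold Spec_index_plan; infer_instance

-- ===== CLAIM (what is proved, stated in full; the proofs are below) =====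
def Claim_equal_index_plan : Prop := ∀ (indices : List (Int × Int)), Dom_index_plan indices → Pre_index_plan indices → Spec_index_plan indices (index_plan indices)

-- ===== LEMMAS AND PROOFS =====

-- the transformed list A stores for a group, and the raw bucket of a group
def pvT (v : List Int) : List Int :=
  (PySem.List.sorted (v.map pyReverse) (fun x => x)).map pyReverse
def pvGrp (indices : List (Int × Int)) (g : Int) : List Int :=
  (indices.filter (fun p => p.1 == g)).map (fun p => p.2)

-- fold of inserts: keys not touched keep their value
lemma getD_foldl_insert_not_mem (F : List Int → List Int) :
    ∀ (l : List (Int × List Int)) (d : PySem.Dict Int (List Int)) (g : Int),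
      g ∉ l.map Prod.fst →
      (l.foldl (fun d p => d.insert p.1 (F p.2)) d).getD g [] = d.getD g [] := by
  intro l
  induction l with
  | nil => intro d g _; rfl
  | cons p t ih =>
    intro d g hg
    simp only [List.map_cons, List.mem_cons, not_or] at hg
    simp only [List.foldl_cons]
    rw [ih _ _ hg.2, PySem.Dict.getD_insert_of_ne _ _ _ hg.1]

-- fold of inserts over a Nodup-key list: each key ends with its own inserted value
lemma getD_foldl_insert_mem (F : List Int → List Int) :
    ∀ (l : List (Int × List Int)) (d : PySem.Dict Int (List Int)) (g : Int) (v : List Int),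
      (l.map Prod.fst).Nodup → (g, v) ∈ l →
      (l.foldl (fun d p => d.insert p.1 (F p.2)) d).getD g [] = F v := by
  intro l
  induction l with
  | nil => intro d g v _ h; simp at h
  | cons p t ih =>
    intro d g v hnd hmem
    simp only [List.map_cons, List.nodup_cons] at hnd
    simp only [List.foldl_cons]
    rcases List.mem_cons.mp hmem with h | h
    · subst h
      rw [getD_foldl_insert_not_mem F t _ g hnd.1, PySem.Dict.getD_insert_self]
    · exact ih _ g v hnd.2 h

-- Set.update by elements already present is the identity
lemma set_update_of_subset (s : PySem.Set Int) (xs : List Int)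
    (h : ∀ x ∈ xs, x ∈ s) : PySem.Set.update s xs = s := by
  rw [PySem.Set.update_eq_append_filter]
  have : (PySem.Set.ofList xs).filter (fun y => !s.contains y) = [] := by
    rw [List.filter_eq_nil_iff]
    intro a ha
    have : a ∈ xs := (PySem.Set.mem_ofList xs a).mp ha
    simp [h a this]
  rw [this, List.append_nil]

-- the empty four-bucket dict both ports start from
lemma d0_keys :
    (((PySem.List.pyRange 0 4 1).foldl (fun d g => d.insert g ([] : List Int))
      PySem.Dict.empty)).keys = [0, 1, 2, 3] := by decide

lemma d0_getD (g : Int) (hg : g ∈ ([0, 1, 2, 3] : List Int)) :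
    (((PySem.List.pyRange 0 4 1).foldl (fun d g => d.insert g ([] : List Int))
      PySem.Dict.empty)).getD g [] = [] := by
  fin_cases hg <;> decide

-- the key order lemma: the per-group slice of B's globally (stably) sorted list of
-- reversed values IS the sorted list of that group's reversed values
lemma filter_sorted_eq (indices : List (Int × Int)) (g : Int) :
    ((PySem.List.sorted (indices.map (fun gi => (pyReverse gi.2, gi.1)))
        (fun p => p.1)).filter (fun p => p.2 == g)).map (fun p => p.1) =
      PySem.List.sorted ((pvGrp indices g).map pyReverse) (fun x => x) := by
  have h1 : ((PySem.List.sorted (indices.map (fun gi => (pyReverse gi.2, gi.1)))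
      (fun p => p.1)).filter (fun p => p.2 == g)).Perm
      ((indices.map (fun gi => (pyReverse gi.2, gi.1))).filter (fun p => p.2 == g)) :=
    (PySem.List.sorted_perm _ _ false).filter _
  have h2 : ((indices.map (fun gi => (pyReverse gi.2, gi.1))).filter
      (fun p => p.2 == g)) = (indices.filter (fun p => p.1 == g)).map
      (fun gi => (pyReverse gi.2, gi.1)) := by
    rw [List.filter_map]; rfl
  have h3 : ((indices.filter (fun p => p.1 == g)).map
      (fun gi => (pyReverse gi.2, gi.1))).map (fun p => p.1)
      = (pvGrp indices g).map pyReverse := by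
    simp [pvGrp, List.map_map]
  have hperm : (((PySem.List.sorted (indices.map (fun gi => (pyReverse gi.2, gi.1)))
      (fun p => p.1)).filter (fun p => p.2 == g)).map (fun p => p.1)).Perm
      (PySem.List.sorted ((pvGrp indices g).map pyReverse) (fun x => x)) := by
    have hm := (h2 ▸ h1).map (fun p : Int × Int => p.1)
    rw [h3] at hm
    exact hm.trans (PySem.List.sorted_perm _ _ false).symm
  have hp1 : List.Pairwise (fun a b : Int × Int => a.1 ≤ b.1)
      ((PySem.List.sorted (indices.map (fun gi => (pyReverse gi.2, gi.1)))
        (fun p => p.1)).filter (fun p => p.2 == g)) :=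
    (PySem.List.sorted_pairwise _ _).filter _
  have hp2 : List.Pairwise (fun a b : Int => a ≤ b)
      (((PySem.List.sorted (indices.map (fun gi => (pyReverse gi.2, gi.1)))
        (fun p => p.1)).filter (fun p => p.2 == g)).map (fun p => p.1)) :=
    List.Pairwise.map _ (fun _ _ h => h) hp1
  exact List.Perm.eq_of_pairwise (fun a b _ _ h1 h2 => le_antisymm h1 h2)
    hp2 (PySem.List.sorted_pairwise _ _) hperm

-- Port A computes [(g, pvT (pvGrp indices g)) for g in [0,1,2,3]]
lemma index_plan_eq (indices : List (Int × Int)) (hpre : Pre_index_plan indices) :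
    index_plan indices =
      ([0, 1, 2, 3] : List Int).map (fun g => (g, pvT (pvGrp indices g))) := by
  unfold index_plan
  set d0 : PySem.Dict Int (List Int) :=
    (PySem.List.pyRange 0 4 1).foldl (fun d g => d.insert g ([] : List Int))
      PySem.Dict.empty with hd0
  set d1 := indices.foldl (fun d p => d.modify p.1 [] (fun l => l ++ [p.2])) d0 with hd1
  have hd1keys : d1.keys = [0, 1, 2, 3] := by
    rw [hd1]
    have := PySem.Dict.keys_foldl_modify_key indices Prod.fst []
      (fun _ p => (fun l => l ++ [p.2])) d0
    rw [this, d0_keys]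
    exact set_update_of_subset _ _ (by
      intro x hx
      rcases List.mem_map.mp hx with ⟨p, hp, rfl⟩
      exact (hpre p hp).1)
  have hd1nd : d1.keys.Nodup := by rw [hd1keys]; decide
  have hd1getD : ∀ g ∈ ([0, 1, 2, 3] : List Int), d1.getD g [] = pvGrp indices g := by
    intro g hg
    rw [hd1, PySem.Dict.getD_foldl_modify_append, d0_getD g hg, List.nil_append]
    rfl
  have hitems : d1.items = ([0, 1, 2, 3] : List Int).map (fun g => (g, d1.getD g [])) := by
    rw [PySem.Dict.items_eq_map_keys d1 hd1nd ([] : List Int), hd1keys]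
  set d2 := d1.items.foldl
    (fun d p => d.insert p.1
      ((PySem.List.sorted (p.2.map pyReverse) (fun x => x)).map pyReverse)) d1 with hd2
  have hd2keys : d2.keys = [0, 1, 2, 3] := by
    rw [hd2]
    have := PySem.Dict.keys_foldl_insert_key d1.items Prod.fst
      (fun _ p => ((PySem.List.sorted (p.2.map pyReverse) (fun x => x)).map pyReverse)) d1
    rw [this, hd1keys]
    refine set_update_of_subset _ _ ?_
    intro x hx
    have : x ∈ d1.keys := hx
    rw [hd1keys] at this; exact this
  have hd2nd : d2.keys.Nodup := by rw [hd2keys]; decide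
  have hd2getD : ∀ g ∈ ([0, 1, 2, 3] : List Int), d2.getD g [] = pvT (pvGrp indices g) := by
    intro g hg
    rw [hd2]
    have hmem : (g, d1.getD g []) ∈ d1.items := by
      rw [hitems]; exact List.mem_map.mpr ⟨g, hg, rfl⟩
    have hnd' : (d1.items.map Prod.fst).Nodup := hd1nd
    rw [getD_foldl_insert_mem
      (fun v => (PySem.List.sorted (v.map pyReverse) (fun x => x)).map pyReverse)
      d1.items d1 g (d1.getD g []) hnd' hmem, hd1getD g hg]
    rfl
  rw [PySem.Dict.items_eq_map_keys d2 hd2nd ([] : List Int), hd2keys]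
  exact List.map_congr_left (fun g hg => by rw [hd2getD g hg])

-- Port B computes the same list
lemma index_plan_alt_eq (indices : List (Int × Int)) (hpre : Pre_index_plan indices) :
    index_plan_alt indices =
      ([0, 1, 2, 3] : List Int).map (fun g => (g, pvT (pvGrp indices g))) := by
  unfold index_plan_alt
  set d0 : PySem.Dict Int (List Int) :=
    (PySem.List.pyRange 0 4 1).foldl (fun d g => d.insert g ([] : List Int))
      PySem.Dict.empty with hd0
  set pairs := PySem.List.sorted (indices.map (fun gi => (pyReverse gi.2, gi.1)))
    (fun p => p.1) with hpairs
  set d := pairs.foldl (fun d p => d.modify p.2 [] (fun l => l ++ [pyReverse p.1])) d0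
    with hd
  have hkeys : d.keys = [0, 1, 2, 3] := by
    rw [hd]
    have := PySem.Dict.keys_foldl_modify_key pairs Prod.snd []
      (fun _ p => (fun l => l ++ [pyReverse p.1])) d0
    rw [this, d0_keys]
    refine set_update_of_subset _ _ ?_
    intro x hx
    rcases List.mem_map.mp hx with ⟨p, hp, rfl⟩
    have : p ∈ indices.map (fun gi => (pyReverse gi.2, gi.1)) :=
      (PySem.List.mem_sorted _ _ _ _).mp hp
    rcases List.mem_map.mp this with ⟨gi, hgi, rfl⟩
    exact (hpre gi hgi).1
  have hnd : d.keys.Nodup := by rw [hkeys]; decide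
  have hgetD : ∀ g ∈ ([0, 1, 2, 3] : List Int), d.getD g [] = pvT (pvGrp indices g) := by
    intro g hg
    rw [hd]
    -- reshape the fold so the generic modify-append lemma applies
    have hshape : pairs.foldl (fun d p => d.modify p.2 [] (fun l => l ++ [pyReverse p.1])) d0
        = (pairs.map (fun p => (p.2, pyReverse p.1))).foldl
            (fun d q => d.modify q.1 [] (fun l => l ++ [q.2])) d0 := by
      rw [List.foldl_map]
    rw [hshape, PySem.Dict.getD_foldl_modify_append, d0_getD g hg, List.nil_append,
      List.filter_map]
    have : ((pairs.filter ((fun q : Int × Int => q.1 == g) ∘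
        (fun p : Int × Int => (p.2, pyReverse p.1)))).map
          (fun p => (p.2, pyReverse p.1))).map (fun x => x.2)
        = ((pairs.filter (fun p => p.2 == g)).map (fun p => p.1)).map pyReverse := by
      simp [List.map_map]; rfl
    rw [this, filter_sorted_eq indices g]
    rfl
  rw [PySem.Dict.items_eq_map_keys d hnd ([] : List Int), hkeys]
  exact List.map_congr_left (fun g hg => by rw [hgetD g hg])

-- ===== VERDICT (by name: the statement is the Claim_ definition above) =====
theorem index_plan_spec : Claim_equal_index_plan := by
  intro indices _ hpre
  unfold Spec_index_plan
  rw [index_plan_eq indices hpre, index_plan_alt_eq indices hpre]
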